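-- pv_equiv track=rewrite | github.com/pypi-data/pypi-mirror-62 | packages/devtrans/devtrans-3.0-py3-none-any.whl/devtrans.py | hk2slp
-- ===== SOURCE A (Python) =====
-- def hk2slp(src):
--     trios = {
--         'lRR': 'X'}
--     duos = {
--         'RR': 'F',
--         'lR': 'x',
--         'ai': 'E',
--         'au': 'O',
--         'kh': 'K',
--         'gh': 'G',
--         'ch': 'C',
--         'jh': 'J',
--         'Th': 'W',
--         'Dh': 'Q',
--         'th': 'T',
--         'dh': 'D',
--         'ph': 'P',
--         'bh': 'B'}
--     monos = {
--         'R': 'f',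
--         'G': 'N',
--         'J': 'Y',
--         'T': 'w',
--         'D': 'q',
--         'N': 'R',
--         'z': 'S',
--         'S': 'z'}
--
--     tgt = ''
--     inc = 0
--     while inc < len(src):
--         now = src[inc]
--         nxt = src[inc+1] if inc < len(src) - 1 else ''
--         aft = src[inc+2] if inc < len(src) - 2 else ''
--         if now + nxt + aft in trios:
--             tgt += trios[now + nxt + aft]
--             inc += 2
--         elif now + nxt in duos:
--             tgt += duos[now + nxt]
--             inc += 1
--         elif now in monos:
--             tgt += monos[now]
--         else:
--             tgt += now
--         inc += 1
--     return tgt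
-- ===== SOURCE B (Python) =====
-- # Precompiled trie (nested dicts; '' marks an accepting node's output).
-- # Walking the trie from each position and keeping the last accepting node
-- # found gives the longest matching key there, which is what the tiered
-- # trio/duo/mono lookup computes.
-- TRIE = {
--     'l': {'R': {'': 'x', 'R': {'': 'X'}}},
--     'R': {'': 'f', 'R': {'': 'F'}},
--     'a': {'i': {'': 'E'}, 'u': {'': 'O'}},
--     'k': {'h': {'': 'K'}},
--     'g': {'h': {'': 'G'}},
--     'c': {'h': {'': 'C'}},
--     'j': {'h': {'': 'J'}},
--     'T': {'': 'w', 'h': {'': 'W'}},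
--     'D': {'': 'q', 'h': {'': 'Q'}},
--     't': {'h': {'': 'T'}},
--     'd': {'h': {'': 'D'}},
--     'p': {'h': {'': 'P'}},
--     'b': {'h': {'': 'B'}},
--     'G': {'': 'N'},
--     'J': {'': 'Y'},
--     'N': {'': 'R'},
--     'z': {'': 'S'},
--     'S': {'': 'z'},
-- }
--
-- def hk2slp(src):
--     out = []
--     i = 0
--     n = len(src)
--     while i < n:
--         node = TRIE
--         j = i
--         best = None  # (end position, output) of the last accepting node seen
--         while j < n and src[j] in node:
--             node = node[src[j]]
--             j += 1
--             if '' in node: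
--                 best = (j, node[''])
--         if best is not None:
--             out.append(best[1])
--             i = best[0]
--         else:
--             out.append(src[i])
--             i += 1
--     return ''.join(out)
-- ===== Notes on version B (the rewrite author's own statement) =====
-- stated objective: alternative
-- what changed: Replaced the three per-length dicts and the 3-tier if/elif index-peeking ladder with a precompiled trie of all keys, walked from each position while remembering the last accepting node (longest match wins), appending outputs to a list joined once instead of quadratic string concatenation.
import Mathlib
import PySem

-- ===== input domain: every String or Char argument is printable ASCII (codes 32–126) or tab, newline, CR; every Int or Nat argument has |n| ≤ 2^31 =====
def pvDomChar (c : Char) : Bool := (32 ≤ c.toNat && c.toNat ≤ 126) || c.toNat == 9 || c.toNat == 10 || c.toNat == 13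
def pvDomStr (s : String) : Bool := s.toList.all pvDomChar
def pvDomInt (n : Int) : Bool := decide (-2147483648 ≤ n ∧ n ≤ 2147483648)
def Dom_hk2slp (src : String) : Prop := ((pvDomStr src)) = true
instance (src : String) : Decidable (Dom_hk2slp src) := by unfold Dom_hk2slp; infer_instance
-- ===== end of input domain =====

-- B replaces A's three dicts and 3-tier if/elif ladder by a precompiled trie of the
-- translit keys, walked from each position keeping the last accepting node (longest
-- match wins); alternative decomposition, same return value on every input.

-- ===== PORT A =====
def pvTrios : PySem.Dict (List Char) (List Char) := PySem.Dict.mk [(['l','R','R'], ['X'])]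
def pvDuos : PySem.Dict (List Char) (List Char) := PySem.Dict.mk
  [(['R','R'], ['F']), (['l','R'], ['x']), (['a','i'], ['E']), (['a','u'], ['O']),
   (['k','h'], ['K']), (['g','h'], ['G']), (['c','h'], ['C']), (['j','h'], ['J']),
   (['T','h'], ['W']), (['D','h'], ['Q']), (['t','h'], ['T']), (['d','h'], ['D']),
   (['p','h'], ['P']), (['b','h'], ['B'])]
def pvMonos : PySem.Dict (List Char) (List Char) := PySem.Dict.mk
  [(['R'], ['f']), (['G'], ['N']), (['J'], ['Y']), (['T'], ['w']),
   (['D'], ['q']), (['N'], ['R']), (['z'], ['S']), (['S'], ['z'])]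

-- A's while loop over the index `inc`, as recursion on the remaining suffix of the
-- string (the loop state is (suffix from inc, tgt)); now/nxt/aft are the 0/1-char
-- strings src[inc], src[inc+1], src[inc+2] ('' when past the end), as in the Python.
def hk2slpGo (l : List Char) (tgt : List Char) : List Char :=
  match l with
  | [] => tgt
  | now :: rest =>
    let nxt := rest.take 1
    let aft := (rest.drop 1).take 1
    match pvTrios.get? (now :: (nxt ++ aft)) with
    | some v => hk2slpGo (rest.drop 2) (tgt ++ v)
    | none =>
      match pvDuos.get? (now :: nxt) with
      | some v => hk2slpGo (rest.drop 1) (tgt ++ v)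
      | none =>
        match pvMonos.get? [now] with
        | some v => hk2slpGo rest (tgt ++ v)
        | none => hk2slpGo rest (tgt ++ [now])
termination_by l.length
decreasing_by all_goals simp [List.length_drop]

def hk2slp (src : String) : String := String.ofList (hk2slpGo src.toList [])

-- ===== PORT B =====
-- the trie: a node holds an optional output ('' key in the Python dict) and its
-- labelled children (mutual pair instead of a nested inductive)
mutual
inductive PvTrie where
  | node (out : Option (List Char)) (kids : PvEdges) : PvTrie
inductive PvEdges where
  | nil : PvEdges
  | cons (c : Char) (t : PvTrie) (rest : PvEdges) : PvEdges
end

-- dict-literal syntax of the Python TRIE, rendered through a list of pairs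
def pvEdges : List (Char × PvTrie) → PvEdges
  | [] => .nil
  | (c, t) :: rest => .cons c t (pvEdges rest)

def pvTrie : PvTrie := .node none (pvEdges [
  ('l', .node none (pvEdges [('R', .node (some ['x']) (pvEdges [('R', .node (some ['X']) .nil)]))])),
  ('R', .node (some ['f']) (pvEdges [('R', .node (some ['F']) .nil)])),
  ('a', .node none (pvEdges [('i', .node (some ['E']) .nil), ('u', .node (some ['O']) .nil)])),
  ('k', .node none (pvEdges [('h', .node (some ['K']) .nil)])),
  ('g', .node none (pvEdges [('h', .node (some ['G']) .nil)])),
  ('c', .node none (pvEdges [('h', .node (some ['C']) .nil)])),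
  ('j', .node none (pvEdges [('h', .node (some ['J']) .nil)])),
  ('T', .node (some ['w']) (pvEdges [('h', .node (some ['W']) .nil)])),
  ('D', .node (some ['q']) (pvEdges [('h', .node (some ['Q']) .nil)])),
  ('t', .node none (pvEdges [('h', .node (some ['T']) .nil)])),
  ('d', .node none (pvEdges [('h', .node (some ['D']) .nil)])),
  ('p', .node none (pvEdges [('h', .node (some ['P']) .nil)])),
  ('b', .node none (pvEdges [('h', .node (some ['B']) .nil)])),
  ('G', .node (some ['N']) .nil),
  ('J', .node (some ['Y']) .nil),
  ('N', .node (some ['R']) .nil),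
  ('z', .node (some ['S']) .nil),
  ('S', .node (some ['z']) .nil)])

-- src[j] in node
def pvFindChild : PvEdges → Char → Option PvTrie
  | .nil, _ => none
  | .cons k t rest, c => if k = c then some t else pvFindChild rest c

-- B's inner while loop: walk the trie along the remaining input (j is the count of
-- consumed characters), remembering the last accepting node as best = (end, output)
def pvWalk : List Char → PvTrie → Nat → Option (Nat × List Char) → Option (Nat × List Char)
  | [], _, _, best => best
  | c :: rest, .node _ kids, j, best =>
    match pvFindChild kids c with
    | none => best
    | some child =>
      let best' := match child with
        | .node (some v) _ => some (j + 1, v)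
        | .node none _ => best
      pvWalk rest child (j + 1) best'

-- termination helper for the outer loop: a successful walk consumed ≥ 1 character
theorem pvWalk_pos : ∀ (l : List Char) (t : PvTrie) (j : Nat) (best : Option (Nat × List Char))
    (n : Nat) (v : List Char), pvWalk l t j best = some (n, v) → best = some (n, v) ∨ j < n := by
  intro l
  induction l with
  | nil => intro t j best n v h; exact Or.inl h
  | cons c rest ih =>
    intro t j best n v h
    obtain ⟨o, kids⟩ := t
    simp only [pvWalk] at h
    cases hf : pvFindChild kids c with
    | none => rw [hf] at h; exact Or.inl h
    | some child =>
      rw [hf] at h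
      obtain ⟨o', kids'⟩ := child
      cases o' with
      | none =>
        rcases ih _ _ _ _ _ h with h' | h'
        · exact Or.inl h'
        · exact Or.inr (by omega)
      | some w =>
        rcases ih _ _ _ _ _ h with h' | h'
        · simp only [Option.some.injEq, Prod.mk.injEq] at h'
          exact Or.inr (by omega)
        · exact Or.inr (by omega)

-- B's outer while loop
def hk2slpAltGo (l : List Char) : List Char :=
  match l with
  | [] => []
  | c :: rest =>
    match h : pvWalk (c :: rest) pvTrie 0 none with
    | some (n, v) => v ++ hk2slpAltGo ((c :: rest).drop n)
    | none => c :: hk2slpAltGo rest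
termination_by l.length
decreasing_by
  · rcases pvWalk_pos _ _ _ _ _ _ h with h' | h'
    · exact absurd h' (by simp)
    · simp [List.length_drop]; omega
  · simp

def hk2slp_alt (src : String) : String := String.ofList (hk2slpAltGo src.toList)

-- ===== PRECONDITION & SPEC =====
def Spec_hk2slp (src : String) (out : String) : Prop := out = hk2slp_alt src
instance (src : String) (out : String) : Decidable (Spec_hk2slp src out) := by unfold Spec_hk2slp; infer_instance

-- ===== CLAIM (what is proved, stated in full; the proofs are below) =====
def Claim_equal_hk2slp : Prop := ∀ (src : String), Dom_hk2slp src → Spec_hk2slp src (hk2slp src)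

-- ===== LEMMAS AND PROOFS =====
theorem pvWalk_nilKids (l : List Char) (o : Option (List Char)) (j : Nat)
    (best : Option (Nat × List Char)) : pvWalk l (.node o .nil) j best = best := by
  cases l <;> simp [pvWalk, pvFindChild]

theorem pvTake2_split (rest : List Char) :
    rest.take 1 ++ (rest.drop 1).take 1 = rest.take 2 := by
  rcases rest with _ | ⟨b, _ | ⟨d, r⟩⟩ <;> simp

set_option maxHeartbeats 4000000 in
-- the step taken at one position: the trie walk finds exactly what A's tiered
-- trio/duo/mono lookups find (with the number of characters it spans)
theorem pvStep (now : Char) (rest : List Char) :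
    pvWalk (now :: rest) pvTrie 0 none =
      match pvTrios.get? ((now :: rest).take 3) with
      | some v => some (3, v)
      | none =>
        match pvDuos.get? ((now :: rest).take 2) with
        | some v => some (2, v)
        | none => (pvMonos.get? [now]).map (fun v => (1, v)) := by
  by_cases hL : ('l' : Char) = now
  · subst hL
    rcases rest with _ | ⟨b, r2⟩
    · decide
    · by_cases hb : ('R' : Char) = b
      · subst hb
        rcases r2 with _ | ⟨c3, r3⟩
        · decide
        · by_cases hc : ('R' : Char) = c3
          · subst hc; simp [pvWalk, pvFindChild, pvTrie, pvEdges, pvTrios, pvDuos, pvMonos, PySem.Dict.get?_mk_cons, PySem.Dict.get?, pvWalk_nilKids, *]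
          · simp [pvWalk, pvFindChild, pvTrie, pvEdges, pvTrios, pvDuos, pvMonos, PySem.Dict.get?_mk_cons, PySem.Dict.get?, pvWalk_nilKids, *]
      · simp [pvWalk, pvFindChild, pvTrie, pvEdges, pvTrios, pvDuos, pvMonos, PySem.Dict.get?_mk_cons, PySem.Dict.get?, pvWalk_nilKids, *]
  by_cases hA0 : ('R' : Char) = now
  · subst hA0
    rcases rest with _ | ⟨b, r2⟩
    · decide
    · by_cases hs : ('R' : Char) = b
      · subst hs; simp [pvWalk, pvFindChild, pvTrie, pvEdges, pvTrios, pvDuos, pvMonos, PySem.Dict.get?_mk_cons, PySem.Dict.get?, pvWalk_nilKids, *]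
      · simp [pvWalk, pvFindChild, pvTrie, pvEdges, pvTrios, pvDuos, pvMonos, PySem.Dict.get?_mk_cons, PySem.Dict.get?, pvWalk_nilKids, *]
  by_cases hA1 : ('T' : Char) = now
  · subst hA1
    rcases rest with _ | ⟨b, r2⟩
    · decide
    · by_cases hs : ('h' : Char) = b
      · subst hs; simp [pvWalk, pvFindChild, pvTrie, pvEdges, pvTrios, pvDuos, pvMonos, PySem.Dict.get?_mk_cons, PySem.Dict.get?, pvWalk_nilKids, *]
      · simp [pvWalk, pvFindChild, pvTrie, pvEdges, pvTrios, pvDuos, pvMonos, PySem.Dict.get?_mk_cons, PySem.Dict.get?, pvWalk_nilKids, *]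
  by_cases hA2 : ('D' : Char) = now
  · subst hA2
    rcases rest with _ | ⟨b, r2⟩
    · decide
    · by_cases hs : ('h' : Char) = b
      · subst hs; simp [pvWalk, pvFindChild, pvTrie, pvEdges, pvTrios, pvDuos, pvMonos, PySem.Dict.get?_mk_cons, PySem.Dict.get?, pvWalk_nilKids, *]
      · simp [pvWalk, pvFindChild, pvTrie, pvEdges, pvTrios, pvDuos, pvMonos, PySem.Dict.get?_mk_cons, PySem.Dict.get?, pvWalk_nilKids, *]
  by_cases hB0 : ('k' : Char) = now
  · subst hB0
    rcases rest with _ | ⟨b, r2⟩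
    · decide
    · by_cases hs : ('h' : Char) = b
      · subst hs; simp [pvWalk, pvFindChild, pvTrie, pvEdges, pvTrios, pvDuos, pvMonos, PySem.Dict.get?_mk_cons, PySem.Dict.get?, pvWalk_nilKids, *]
      · simp [pvWalk, pvFindChild, pvTrie, pvEdges, pvTrios, pvDuos, pvMonos, PySem.Dict.get?_mk_cons, PySem.Dict.get?, pvWalk_nilKids, *]
  by_cases hB1 : ('g' : Char) = now
  · subst hB1
    rcases rest with _ | ⟨b, r2⟩
    · decide
    · by_cases hs : ('h' : Char) = b
      · subst hs; simp [pvWalk, pvFindChild, pvTrie, pvEdges, pvTrios, pvDuos, pvMonos, PySem.Dict.get?_mk_cons, PySem.Dict.get?, pvWalk_nilKids, *]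
      · simp [pvWalk, pvFindChild, pvTrie, pvEdges, pvTrios, pvDuos, pvMonos, PySem.Dict.get?_mk_cons, PySem.Dict.get?, pvWalk_nilKids, *]
  by_cases hB2 : ('c' : Char) = now
  · subst hB2
    rcases rest with _ | ⟨b, r2⟩
    · decide
    · by_cases hs : ('h' : Char) = b
      · subst hs; simp [pvWalk, pvFindChild, pvTrie, pvEdges, pvTrios, pvDuos, pvMonos, PySem.Dict.get?_mk_cons, PySem.Dict.get?, pvWalk_nilKids, *]
      · simp [pvWalk, pvFindChild, pvTrie, pvEdges, pvTrios, pvDuos, pvMonos, PySem.Dict.get?_mk_cons, PySem.Dict.get?, pvWalk_nilKids, *]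
  by_cases hB3 : ('j' : Char) = now
  · subst hB3
    rcases rest with _ | ⟨b, r2⟩
    · decide
    · by_cases hs : ('h' : Char) = b
      · subst hs; simp [pvWalk, pvFindChild, pvTrie, pvEdges, pvTrios, pvDuos, pvMonos, PySem.Dict.get?_mk_cons, PySem.Dict.get?, pvWalk_nilKids, *]
      · simp [pvWalk, pvFindChild, pvTrie, pvEdges, pvTrios, pvDuos, pvMonos, PySem.Dict.get?_mk_cons, PySem.Dict.get?, pvWalk_nilKids, *]
  by_cases hB4 : ('t' : Char) = now
  · subst hB4
    rcases rest with _ | ⟨b, r2⟩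
    · decide
    · by_cases hs : ('h' : Char) = b
      · subst hs; simp [pvWalk, pvFindChild, pvTrie, pvEdges, pvTrios, pvDuos, pvMonos, PySem.Dict.get?_mk_cons, PySem.Dict.get?, pvWalk_nilKids, *]
      · simp [pvWalk, pvFindChild, pvTrie, pvEdges, pvTrios, pvDuos, pvMonos, PySem.Dict.get?_mk_cons, PySem.Dict.get?, pvWalk_nilKids, *]
  by_cases hB5 : ('d' : Char) = now
  · subst hB5
    rcases rest with _ | ⟨b, r2⟩
    · decide
    · by_cases hs : ('h' : Char) = b
      · subst hs; simp [pvWalk, pvFindChild, pvTrie, pvEdges, pvTrios, pvDuos, pvMonos, PySem.Dict.get?_mk_cons, PySem.Dict.get?, pvWalk_nilKids, *]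
      · simp [pvWalk, pvFindChild, pvTrie, pvEdges, pvTrios, pvDuos, pvMonos, PySem.Dict.get?_mk_cons, PySem.Dict.get?, pvWalk_nilKids, *]
  by_cases hB6 : ('p' : Char) = now
  · subst hB6
    rcases rest with _ | ⟨b, r2⟩
    · decide
    · by_cases hs : ('h' : Char) = b
      · subst hs; simp [pvWalk, pvFindChild, pvTrie, pvEdges, pvTrios, pvDuos, pvMonos, PySem.Dict.get?_mk_cons, PySem.Dict.get?, pvWalk_nilKids, *]
      · simp [pvWalk, pvFindChild, pvTrie, pvEdges, pvTrios, pvDuos, pvMonos, PySem.Dict.get?_mk_cons, PySem.Dict.get?, pvWalk_nilKids, *]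
  by_cases hB7 : ('b' : Char) = now
  · subst hB7
    rcases rest with _ | ⟨b, r2⟩
    · decide
    · by_cases hs : ('h' : Char) = b
      · subst hs; simp [pvWalk, pvFindChild, pvTrie, pvEdges, pvTrios, pvDuos, pvMonos, PySem.Dict.get?_mk_cons, PySem.Dict.get?, pvWalk_nilKids, *]
      · simp [pvWalk, pvFindChild, pvTrie, pvEdges, pvTrios, pvDuos, pvMonos, PySem.Dict.get?_mk_cons, PySem.Dict.get?, pvWalk_nilKids, *]
  by_cases hD : ('a' : Char) = now
  · subst hD
    rcases rest with _ | ⟨b, r2⟩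
    · decide
    · by_cases hi : ('i' : Char) = b
      · subst hi; simp [pvWalk, pvFindChild, pvTrie, pvEdges, pvTrios, pvDuos, pvMonos, PySem.Dict.get?_mk_cons, PySem.Dict.get?, pvWalk_nilKids, *]
      · by_cases hu : ('u' : Char) = b
        · subst hu; simp [pvWalk, pvFindChild, pvTrie, pvEdges, pvTrios, pvDuos, pvMonos, PySem.Dict.get?_mk_cons, PySem.Dict.get?, pvWalk_nilKids, *]
        · simp [pvWalk, pvFindChild, pvTrie, pvEdges, pvTrios, pvDuos, pvMonos, PySem.Dict.get?_mk_cons, PySem.Dict.get?, pvWalk_nilKids, *]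
  by_cases hE0 : ('G' : Char) = now
  · subst hE0; simp [pvWalk, pvFindChild, pvTrie, pvEdges, pvTrios, pvDuos, pvMonos, PySem.Dict.get?_mk_cons, PySem.Dict.get?, pvWalk_nilKids, *]
  by_cases hE1 : ('J' : Char) = now
  · subst hE1; simp [pvWalk, pvFindChild, pvTrie, pvEdges, pvTrios, pvDuos, pvMonos, PySem.Dict.get?_mk_cons, PySem.Dict.get?, pvWalk_nilKids, *]
  by_cases hE2 : ('N' : Char) = now
  · subst hE2; simp [pvWalk, pvFindChild, pvTrie, pvEdges, pvTrios, pvDuos, pvMonos, PySem.Dict.get?_mk_cons, PySem.Dict.get?, pvWalk_nilKids, *]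
  by_cases hE3 : ('z' : Char) = now
  · subst hE3; simp [pvWalk, pvFindChild, pvTrie, pvEdges, pvTrios, pvDuos, pvMonos, PySem.Dict.get?_mk_cons, PySem.Dict.get?, pvWalk_nilKids, *]
  by_cases hE4 : ('S' : Char) = now
  · subst hE4; simp [pvWalk, pvFindChild, pvTrie, pvEdges, pvTrios, pvDuos, pvMonos, PySem.Dict.get?_mk_cons, PySem.Dict.get?, pvWalk_nilKids, *]
  simp [pvWalk, pvFindChild, pvTrie, pvEdges, pvTrios, pvDuos, pvMonos, PySem.Dict.get?_mk_cons, PySem.Dict.get?, pvWalk_nilKids, *]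

theorem altGo_eq_some {c : Char} {rest : List Char} {n : Nat} {v : List Char}
    (h : pvWalk (c :: rest) pvTrie 0 none = some (n, v)) :
    hk2slpAltGo (c :: rest) = v ++ hk2slpAltGo ((c :: rest).drop n) := by
  rw [hk2slpAltGo]
  split
  · rename_i n' v' heq
    rw [h] at heq
    simp only [Option.some.injEq, Prod.mk.injEq] at heq
    rw [heq.1, heq.2]
  · rename_i heq
    rw [h] at heq
    exact absurd heq (by simp)

theorem altGo_eq_none {c : Char} {rest : List Char}
    (h : pvWalk (c :: rest) pvTrie 0 none = none) :
    hk2slpAltGo (c :: rest) = c :: hk2slpAltGo rest := by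
  rw [hk2slpAltGo]
  split
  · rename_i n' v' heq
    rw [h] at heq
    exact absurd heq (by simp)
  · rfl

theorem hk2slpGo_eq : ∀ (n : Nat) (l : List Char), l.length ≤ n →
    ∀ (tgt : List Char), hk2slpGo l tgt = tgt ++ hk2slpAltGo l := by
  intro n
  induction n with
  | zero =>
    intro l h tgt
    have : l = [] := by cases l <;> simp_all
    subst this
    simp [hk2slpGo, hk2slpAltGo]
  | succ n ih =>
    intro l h tgt
    rcases l with _ | ⟨now, rest⟩
    · simp [hk2slpGo, hk2slpAltGo]
    · have hstep := pvStep now rest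
      have hkey3 : now :: (rest.take 1 ++ (rest.drop 1).take 1) = (now :: rest).take 3 := by
        rw [pvTake2_split]; rfl
      simp only [hk2slpGo, hkey3,
        show now :: rest.take 1 = (now :: rest).take 2 from rfl]
      rcases hT : pvTrios.get? ((now :: rest).take 3) with _ | v
      · rcases hD : pvDuos.get? ((now :: rest).take 2) with _ | v
        · rcases hM : pvMonos.get? [now] with _ | v
          · rw [hT, hD, hM] at hstep
            have hs' : pvWalk (now :: rest) pvTrie 0 none = none := hstep
            show hk2slpGo rest (tgt ++ [now]) = tgt ++ hk2slpAltGo (now :: rest)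
            rw [altGo_eq_none hs', ih rest (by simp at h; omega)]
            simp
          · rw [hT, hD, hM] at hstep
            have hs' : pvWalk (now :: rest) pvTrie 0 none = some (1, v) := hstep
            show hk2slpGo rest (tgt ++ v) = tgt ++ hk2slpAltGo (now :: rest)
            rw [altGo_eq_some hs', ih rest (by simp at h; omega)]
            simp
        · rw [hT, hD] at hstep
          have hs' : pvWalk (now :: rest) pvTrie 0 none = some (2, v) := hstep
          show hk2slpGo (rest.drop 1) (tgt ++ v) = tgt ++ hk2slpAltGo (now :: rest)
          rw [altGo_eq_some hs', ih (rest.drop 1) (by simp at h ⊢; omega)]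
          simp
      · rw [hT] at hstep
        have hs' : pvWalk (now :: rest) pvTrie 0 none = some (3, v) := hstep
        show hk2slpGo (rest.drop 2) (tgt ++ v) = tgt ++ hk2slpAltGo (now :: rest)
        rw [altGo_eq_some hs', ih (rest.drop 2) (by simp at h ⊢; omega)]
        simp

-- ===== VERDICT (by name: the statement is the Claim_ definition above) =====
theorem hk2slp_spec : Claim_equal_hk2slp := by
  intro src _
  unfold Spec_hk2slp hk2slp hk2slp_alt
  rw [hk2slpGo_eq src.toList.length src.toList (le_refl _)]
  simp
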